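-- pv_equiv track=rewrite | github.com/anishmalikk/IB-Company-Screening-Tool | backend/intelligent_treasurer_system.py | _is_definitely_outdated
-- ===== SOURCE A (Python) =====
-- def _is_definitely_outdated(context: str) -> bool:
--     """Check if context contains definitely outdated information"""
--     context_lower = context.lower()
--
--     # Check for specific outdated indicators - generalized approach
--     outdated_indicators = [
--         'former treasurer',
--         'past treasurer',
--         'previously treasurer',
--         'until 2022',
--         'until 2023',
--         'through 2022',
--         'through 2023',
--         'left in 2022',
--         'left in 2023',
--         'ended in 2022',
--         'ended in 2023',
--         'resigned in 2022',
--         'resigned in 2023',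
--         'retired in 2022',
--         'retired in 2023'
--     ]
--
--     return any(indicator in context_lower for indicator in outdated_indicators)
-- ===== SOURCE B (Python) =====
-- def _is_definitely_outdated(context: str) -> bool:
--     """Single left-to-right scan: at each position, test whether any
--     indicator starts there (position-major instead of pattern-major)."""
--     indicators = [
--         'former treasurer',
--         'past treasurer',
--         'previously treasurer',
--         'until 2022',
--         'until 2023',
--         'through 2022',
--         'through 2023',
--         'left in 2022',
--         'left in 2023',
--         'ended in 2022',
--         'ended in 2023',
--         'resigned in 2022',
--         'resigned in 2023',
--         'retired in 2022',
--         'retired in 2023'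
--     ]
--     s = context.lower()
--     for i in range(len(s) + 1):
--         for ind in indicators:
--             if s.startswith(ind, i):
--                 return True
--     return False
-- ===== Notes on version B (the rewrite author's own statement) =====
-- stated objective: alternative
-- what changed: Replaces the per-pattern membership loop (one containment test per indicator over the whole string) by a single position-major scan of the lowercased string that tests at each index whether any indicator starts there.
import Mathlib
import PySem

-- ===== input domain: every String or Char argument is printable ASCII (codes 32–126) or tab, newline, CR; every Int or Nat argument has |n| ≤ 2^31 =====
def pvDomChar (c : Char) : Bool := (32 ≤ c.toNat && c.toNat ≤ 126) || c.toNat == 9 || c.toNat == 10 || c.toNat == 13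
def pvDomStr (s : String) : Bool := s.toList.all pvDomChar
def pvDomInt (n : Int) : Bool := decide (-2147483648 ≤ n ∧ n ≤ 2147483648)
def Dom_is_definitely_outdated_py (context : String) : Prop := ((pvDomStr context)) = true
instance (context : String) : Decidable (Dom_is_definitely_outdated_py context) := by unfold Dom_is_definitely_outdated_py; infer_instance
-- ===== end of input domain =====

-- B replaces A's per-pattern substring-membership loop by one position-major scan
-- of the lowercased string (alternative decomposition, same cost).

def pvIndicators : List String :=
  ["former treasurer", "past treasurer", "previously treasurer",
   "until 2022", "until 2023", "through 2022", "through 2023",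
   "left in 2022", "left in 2023", "ended in 2022", "ended in 2023",
   "resigned in 2022", "resigned in 2023", "retired in 2022", "retired in 2023"]

-- ===== PORT A =====
-- any(indicator in context_lower for indicator in outdated_indicators)
def is_definitely_outdated_py (context : String) : Bool :=
  let context_lower := PySem.Str.lower context
  pvIndicators.any (fun indicator => PySem.Str.isIn indicator context_lower)

-- ===== PORT B =====
-- for i in range(len(s)+1): for ind in indicators: if s.startswith(ind, i): return True
-- ported as a recursion over the suffixes of the lowercased string
def pvAltScan (inds : List (List Char)) : List Char → Bool
  | [] => inds.any (fun p => p.isPrefixOf ([] : List Char))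
  | c :: t => inds.any (fun p => p.isPrefixOf (c :: t)) || pvAltScan inds t

def is_definitely_outdated_py_alt (context : String) : Bool :=
  pvAltScan (pvIndicators.map String.toList) (PySem.Str.lower context).toList

-- ===== PRECONDITION & SPEC =====
def Spec_is_definitely_outdated_py (context : String) (out : Bool) : Prop := out = is_definitely_outdated_py_alt context
instance (context : String) (out : Bool) : Decidable (Spec_is_definitely_outdated_py context out) := by unfold Spec_is_definitely_outdated_py; infer_instance

-- ===== CLAIM (what is proved, stated in full; the proofs are below) =====
def Claim_equal_is_definitely_outdated_py : Prop := ∀ (context : String), Dom_is_definitely_outdated_py context → Spec_is_definitely_outdated_py context (is_definitely_outdated_py context)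

-- ===== LEMMAS AND PROOFS =====

theorem pvAltScan_iff (inds : List (List Char)) (cs : List Char) :
    pvAltScan inds cs = true ↔ ∃ p ∈ inds, p <:+: cs := by
  induction cs with
  | nil =>
      simp [pvAltScan, List.any_eq_true, List.isPrefixOf_iff_prefix]
  | cons c t ih =>
      simp only [pvAltScan, Bool.or_eq_true, List.any_eq_true,
        List.isPrefixOf_iff_prefix, ih, List.infix_cons_iff]
      constructor
      · rintro (⟨p, hp, h⟩ | ⟨p, hp, h⟩)
        · exact ⟨p, hp, Or.inl h⟩
        · exact ⟨p, hp, Or.inr h⟩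
      · rintro ⟨p, hp, h | h⟩
        · exact Or.inl ⟨p, hp, h⟩
        · exact Or.inr ⟨p, hp, h⟩

-- ===== VERDICT (by name: the statement is the Claim_ definition above) =====
theorem is_definitely_outdated_py_spec : Claim_equal_is_definitely_outdated_py := by
  intro context _
  unfold Spec_is_definitely_outdated_py is_definitely_outdated_py is_definitely_outdated_py_alt
  rw [Bool.eq_iff_iff, pvAltScan_iff]
  simp only [List.any_eq_true, PySem.Str.isIn_iff_infix, List.mem_map]
  constructor
  · rintro ⟨ind, hind, h⟩; exact ⟨ind.toList, ⟨ind, hind, rfl⟩, h⟩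
  · rintro ⟨p, ⟨ind, hind, rfl⟩, h⟩; exact ⟨ind, hind, h⟩
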